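-- pv_equiv track=rewrite | github.com/Myriad-Dreamin/pycanalysis | pycanalysis.py | calc_cond
-- ===== SOURCE A (Python) =====
-- def calc_cond(args):
--     for i, s in enumerate(args):
--         while True:
--             if s.startswith('!(!('):
--                 s = s[4:-2]
--                 continue
--             if s.startswith('!(!'):
--                 s = s[3:-1]
--                 continue
--             break
--         args[i] = s
--     return ' && '.join(args)
-- ===== SOURCE B (Python) =====
-- def calc_cond(args):
--     # Single pass per string: move a front pointer past '!(!('/'!(!' prefixes while
--     # counting the matching back trim, then take one final slice. Does not mutate args
--     # (A rewrites args in place; equivalence is about the return value).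
--     parts = []
--     for s in args:
--         n = len(s)
--         i = 0
--         j = 0
--         while True:
--             if n - j - i >= 4 and s[i:i + 4] == '!(!(':
--                 i += 4
--                 j += 2
--             elif n - j - i >= 3 and s[i:i + 3] == '!(!':
--                 i += 3
--                 j += 1
--             else:
--                 break
--         parts.append(s[i:n - j])
--     return ' && '.join(parts)
-- ===== Notes on version B (the rewrite author's own statement) =====
-- stated objective: alternative
-- what changed: A repeatedly rebuilds each string with slicing (s = s[4:-2] / s[3:-1]) inside its while-loop and mutates args in place; B scans each string once with a front pointer i and an accumulated back-trim counter j and takes a single final slice s[i:n-j], mutating nothing.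
import Mathlib
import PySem

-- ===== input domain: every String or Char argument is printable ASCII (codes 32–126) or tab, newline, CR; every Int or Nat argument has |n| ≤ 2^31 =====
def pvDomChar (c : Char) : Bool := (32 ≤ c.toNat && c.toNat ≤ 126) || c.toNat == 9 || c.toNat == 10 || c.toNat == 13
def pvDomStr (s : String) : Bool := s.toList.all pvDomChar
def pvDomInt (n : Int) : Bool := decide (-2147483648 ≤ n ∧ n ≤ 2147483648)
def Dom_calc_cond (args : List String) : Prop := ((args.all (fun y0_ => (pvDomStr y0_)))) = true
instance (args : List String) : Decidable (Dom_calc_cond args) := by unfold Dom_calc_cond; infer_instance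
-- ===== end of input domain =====

-- B replaces A's repeated re-slicing of each string by a single front-pointer scan
-- (counters i, j plus one final slice); no intermediate strings are built (objective: alternative).
-- A rewrites the list `args` in place; B does not — the equivalence proved here is about the return value.

-- ===== PORT A =====
-- A's inner while-loop: repeatedly strip '!(!(' (s = s[4:-2]) or '!(!' (s = s[3:-1]).
def pvPeelA (s : List Char) : List Char :=
  if PySem.Chars.startswith s ['!', '(', '!', '('] then
    pvPeelA (PySem.Chars.slice s (some 4) (some (-2)))
  else if PySem.Chars.startswith s ['!', '(', '!'] then
    pvPeelA (PySem.Chars.slice s (some 3) (some (-1)))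
  else s
termination_by s.length
decreasing_by
  · have h4 : (4 : Nat) ≤ s.length := by
      have := (PySem.Chars.startswith_iff s ['!', '(', '!', '(']).mp (by assumption)
      simpa using this.length_le
    simp [PySem.Chars.slice_eq_listSlice, PySem.List.slice, PySem.List.clampIdx]
    omega
  · have h3 : (3 : Nat) ≤ s.length := by
      have := (PySem.Chars.startswith_iff s ['!', '(', '!']).mp (by assumption)
      simpa using this.length_le
    simp [PySem.Chars.slice_eq_listSlice, PySem.List.slice, PySem.List.clampIdx]
    omega

def calc_cond (args : List String) : String :=
  PySem.Str.join " && " (args.map (fun s => String.mk (pvPeelA s.toList)))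

-- ===== PORT B =====
-- B's inner while-loop: advance front pointer i, accumulate back trim j; no string is rebuilt.
def pvPeelB (s : List Char) (n i j : Nat) : Nat × Nat :=
  if h4 : 4 ≤ n - j - i ∧ PySem.List.slice s (some (i : Int)) (some ((i : Int) + 4)) = ['!', '(', '!', '('] then
    pvPeelB s n (i + 4) (j + 2)
  else if h3 : 3 ≤ n - j - i ∧ PySem.List.slice s (some (i : Int)) (some ((i : Int) + 3)) = ['!', '(', '!'] then
    pvPeelB s n (i + 3) (j + 1)
  else (i, j)
termination_by n - j - i
decreasing_by · omega
              · omega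

def calc_cond_alt (args : List String) : String :=
  PySem.Str.join " && " (args.map (fun s =>
    let n := s.toList.length
    let p := pvPeelB s.toList n 0 0
    String.mk (PySem.List.slice s.toList (some (p.1 : Int)) (some ((n : Int) - (p.2 : Int))))))

-- ===== PRECONDITION & SPEC =====
def Spec_calc_cond (args : List String) (out : String) : Prop := out = calc_cond_alt args
instance (args : List String) (out : String) : Decidable (Spec_calc_cond args out) := by unfold Spec_calc_cond; infer_instance

-- ===== CLAIM (what is proved, stated in full; the proofs are below) =====
def Claim_equal_calc_cond : Prop := ∀ (args : List String), Dom_calc_cond args → Spec_calc_cond args (calc_cond args)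

-- ===== LEMMAS AND PROOFS =====

-- the current string of B's loop state (i, j): s with i chars peeled in front and j behind
def pvCur (s : List Char) (i j : Nat) : List Char := (s.drop i).take (s.length - j - i)

theorem pvCur_len (s : List Char) (i j : Nat) :
    (pvCur s i j).length = s.length - j - i := by
  simp [pvCur]; omega

theorem pvSlice_eq_take (s : List Char) (i k : Nat) :
    PySem.List.slice s (some (i : Int)) (some ((i : Int) + (k : Int))) = (s.drop i).take k := by
  have : ((i : Int) + (k : Int)) = ((i + k : Nat) : Int) := by push_cast; ring
  rw [this, PySem.List.slice_natCast]
  congr 1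
  omega

theorem pvStarts_iff (s : List Char) (i j k : Nat) (p : List Char) (hj : j ≤ s.length)
    (hp : p.length = k) :
    PySem.Chars.startswith (pvCur s i j) p = true ↔
      (k ≤ s.length - j - i ∧ PySem.List.slice s (some (i : Int)) (some ((i : Int) + (k : Int))) = p) := by
  rw [PySem.Chars.startswith_iff, List.prefix_iff_eq_take, pvSlice_eq_take]
  constructor
  · intro h
    have hlen : p.length ≤ (pvCur s i j).length := by
      conv_lhs => rw [h]
      simp
    rw [pvCur_len s i j] at hlen
    refine ⟨by omega, ?_⟩
    rw [h, hp, pvCur, List.take_take]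
    congr 1
    omega
  · rintro ⟨hle, he⟩
    rw [hp, pvCur, List.take_take]
    rw [← he]
    congr 1
    omega

theorem pvSliceNegStop (c : List Char) (a b : Nat) (ha : a ≤ c.length) (hb1 : 0 < b)
    (hb2 : b ≤ c.length) :
    PySem.List.slice c (some (a : Int)) (some (-(b : Int))) = (c.drop a).take (c.length - b - a) := by
  have e1 : PySem.List.clampIdx c.length (a : Int) = a := by
    unfold PySem.List.clampIdx
    split_ifs <;> omega
  have e2 : PySem.List.clampIdx c.length (-(b : Int)) = c.length - b := by
    unfold PySem.List.clampIdx
    split_ifs <;> omega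
  simp only [PySem.List.slice, e1, e2]

theorem pvStep (s : List Char) (i j a b : Nat) (hj : j ≤ s.length)
    (ha : a ≤ s.length - j - i) (hb1 : 0 < b) (hb2 : b ≤ s.length - j - i) :
    PySem.Chars.slice (pvCur s i j) (some (a : Int)) (some (-(b : Int))) = pvCur s (i + a) (j + b) := by
  have hL : (pvCur s i j).length = s.length - j - i := pvCur_len s i j
  rw [PySem.Chars.slice_eq_listSlice, pvSliceNegStop _ a b (by omega) hb1 (by omega), hL]
  simp only [pvCur, List.drop_take, List.drop_drop, List.take_take]
  congr 1
  omega

-- the two loops agree: A's peeled string is B's (i, j)-window into s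
theorem pvPeel_agree (s : List Char) :
    ∀ (m i j : Nat), s.length - j - i ≤ m → j ≤ s.length →
      pvPeelA (pvCur s i j) =
        pvCur s (pvPeelB s s.length i j).1 (pvPeelB s s.length i j).2 := by
  intro m
  induction m with
  | zero =>
    intro i j hm hj
    rw [pvPeelB, pvPeelA]
    have h4 : PySem.Chars.startswith (pvCur s i j) ['!', '(', '!', '('] ≠ true := by
      intro h
      rw [pvStarts_iff s i j 4 ['!', '(', '!', '('] hj rfl] at h
      omega
    have h3 : PySem.Chars.startswith (pvCur s i j) ['!', '(', '!'] ≠ true := by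
      intro h
      rw [pvStarts_iff s i j 3 ['!', '(', '!'] hj rfl] at h
      omega
    simp only [h4, h3]
    have c4 : ¬ (4 ≤ s.length - j - i ∧ PySem.List.slice s (some (i : Int)) (some ((i : Int) + 4)) = ['!', '(', '!', '(']) := by
      intro h; omega
    have c3 : ¬ (3 ≤ s.length - j - i ∧ PySem.List.slice s (some (i : Int)) (some ((i : Int) + 3)) = ['!', '(', '!']) := by
      intro h; omega
    simp [c4, c3]
  | succ m ih =>
    intro i j hm hj
    by_cases c4 : 4 ≤ s.length - j - i ∧ PySem.List.slice s (some (i : Int)) (some ((i : Int) + 4)) = ['!', '(', '!', '(']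
    · have hs4 : PySem.Chars.startswith (pvCur s i j) ['!', '(', '!', '('] = true := by
        rw [pvStarts_iff s i j 4 _ hj rfl]
        exact ⟨c4.1, by exact_mod_cast c4.2⟩
      rw [pvPeelA, if_pos hs4, pvPeelB, dif_pos c4]
      rw [show ((-2 : Int)) = -((2 : Nat) : Int) by norm_num,
          show ((4 : Int)) = ((4 : Nat) : Int) by norm_num,
          pvStep s i j 4 2 hj (by have := c4.1; omega) (by omega) (by have := c4.1; omega)]
      exact ih (i + 4) (j + 2) (by have := c4.1; omega) (by have := c4.1; omega)
    · by_cases c3 : 3 ≤ s.length - j - i ∧ PySem.List.slice s (some (i : Int)) (some ((i : Int) + 3)) = ['!', '(', '!']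
      · have hs4 : PySem.Chars.startswith (pvCur s i j) ['!', '(', '!', '('] ≠ true := by
          intro h
          rw [pvStarts_iff s i j 4 ['!', '(', '!', '('] hj rfl] at h
          exact c4 ⟨h.1, by exact_mod_cast h.2⟩
        have hs3 : PySem.Chars.startswith (pvCur s i j) ['!', '(', '!'] = true := by
          rw [pvStarts_iff s i j 3 _ hj rfl]
          exact ⟨c3.1, by exact_mod_cast c3.2⟩
        rw [pvPeelA, if_neg hs4, if_pos hs3, pvPeelB, dif_neg c4, dif_pos c3]
        rw [show ((-1 : Int)) = -((1 : Nat) : Int) by norm_num,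
            show ((3 : Int)) = ((3 : Nat) : Int) by norm_num,
            pvStep s i j 3 1 hj (by have := c3.1; omega) (by omega) (by have := c3.1; omega)]
        exact ih (i + 3) (j + 1) (by have := c3.1; omega) (by have := c3.1; omega)
      · have hs4 : PySem.Chars.startswith (pvCur s i j) ['!', '(', '!', '('] ≠ true := by
          intro h
          rw [pvStarts_iff s i j 4 ['!', '(', '!', '('] hj rfl] at h
          exact c4 ⟨h.1, by exact_mod_cast h.2⟩
        have hs3 : PySem.Chars.startswith (pvCur s i j) ['!', '(', '!'] ≠ true := by
          intro h
          rw [pvStarts_iff s i j 3 ['!', '(', '!'] hj rfl] at h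
          exact c3 ⟨h.1, by exact_mod_cast h.2⟩
        rw [pvPeelA, pvPeelB]
        simp [hs4, hs3, c4, c3]

theorem pvPeelB_j_le (s : List Char) (n i j : Nat) (hj : j ≤ n) :
    (pvPeelB s n i j).2 ≤ n := by
  fun_induction pvPeelB s n i j with
  | case1 i j h4 ih => exact ih (by omega)
  | case2 i j _ h3 ih => exact ih (by omega)
  | case3 i j _ _ => exact hj

theorem pvElem_agree (s : String) :
    String.mk (pvPeelA s.toList) =
      (fun s : String =>
        let n := s.toList.length
        let p := pvPeelB s.toList n 0 0
        String.mk (PySem.List.slice s.toList (some (p.1 : Int)) (some ((n : Int) - (p.2 : Int))))) s := by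
  simp only
  have h0 : pvCur s.toList 0 0 = s.toList := by
    simp [pvCur]
  have := pvPeel_agree s.toList s.toList.length 0 0 (by omega) (by omega)
  rw [h0] at this
  rw [this]
  congr 1
  have hj : (pvPeelB s.toList s.toList.length 0 0).2 ≤ s.toList.length :=
    pvPeelB_j_le s.toList s.toList.length 0 0 (by omega)
  have hcast : ((s.toList.length : Int) - ((pvPeelB s.toList s.toList.length 0 0).2 : Int))
      = ((s.toList.length - (pvPeelB s.toList s.toList.length 0 0).2 : Nat) : Int) := by omega
  rw [hcast, PySem.List.slice_natCast, pvCur]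

-- ===== VERDICT (by name: the statement is the Claim_ definition above) =====
theorem calc_cond_spec : Claim_equal_calc_cond := by
  intro args _
  unfold Spec_calc_cond calc_cond calc_cond_alt
  congr 1
  exact List.map_congr_left (fun s _ => pvElem_agree s)
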